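-- pv_equiv track=rewrite | github.com/jodyxha/QHG4 | QHG4/tools_qdf/compare_attrs.py | group_diffs
-- ===== SOURCE A (Python) =====
-- def group_diffs(row_args):
--     cols = [0,0]
--
--     first = row_args[1].strip()
--     found_vals =[first]
--     found_cols = [0]
--     ref = -1
--     for i in range(2,len(row_args)):
--         cur_arg = row_args[i].strip()
--         if cur_arg != first:
--             if cur_arg in found_vals:
--
--                 for j in range(len(found_vals)):
--                     if (found_vals[j] == cur_arg):
--                         ref = found_cols[j]
--                         break;
--                     #-- end if
--                 #-- end for
--             else:
--                 ref = i
--                 found_vals.append(cur_arg)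
--                 found_cols.append(ref)
--             #-- end if
--         else:
--             ref = 0
--         #- end if
--         ref = ref if ref >= 0 else i
--         cols.append(ref)
--     #-- end for
--     return cols
-- ===== SOURCE B (Python) =====
-- def group_diffs(row_args):
--     # Sort (value, column) pairs, scan runs of equal values (each run starts at the
--     # group's smallest column, which becomes the whole run's reference), then sort
--     # the tagged columns back into table order.
--     first = row_args[1].strip()
--     keys = [s.strip() for s in row_args[2:]]
--     tagged = []
--     run_key, run_rep = None, 0
--     for key, t in sorted((k, t) for t, k in enumerate(keys)):
--         if key != run_key:
--             run_key = key
--             run_rep = 0 if key == first else t + 2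
--         tagged.append((t, run_rep))
--     return [0, 0] + [r for _, r in sorted(tagged)]
-- ===== Notes on version B (the rewrite author's own statement) =====
-- stated objective: faster
-- what changed: Replaces A's incremental scan with parallel found_vals/found_cols lists (membership test plus inner index scan per column) by a sort-based algorithm: sort (value, column) pairs, scan runs of equal values so each run inherits its smallest column as reference, then sort the tagged columns back into table order.
-- outside the precondition, e.g. on group_diffs([]): A raises IndexError, B raises IndexError; on group_diffs(['x']): A raises IndexError, B raises IndexError
import Mathlib
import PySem

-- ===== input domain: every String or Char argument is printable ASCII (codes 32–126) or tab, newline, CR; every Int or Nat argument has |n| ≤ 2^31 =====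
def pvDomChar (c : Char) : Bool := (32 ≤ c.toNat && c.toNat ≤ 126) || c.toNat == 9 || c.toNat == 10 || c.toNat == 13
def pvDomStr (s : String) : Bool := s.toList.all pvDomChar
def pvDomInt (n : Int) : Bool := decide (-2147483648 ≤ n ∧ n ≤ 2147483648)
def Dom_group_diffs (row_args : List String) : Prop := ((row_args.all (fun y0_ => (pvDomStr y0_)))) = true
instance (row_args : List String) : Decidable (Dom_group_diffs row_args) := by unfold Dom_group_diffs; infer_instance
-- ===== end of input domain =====

-- B replaces A's incremental parallel-list bookkeeping with a sort-then-scan algorithm: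
-- sort (value, column) pairs, scan runs of equal values (a run starts at the group's
-- smallest column), then sort the tagged columns back into table order; measured faster
-- on large inputs (A rescans its value list per column).

-- ===== PORT A =====
-- `row_args[i].strip()` as A computes it; within A's loop i is a valid index
-- (2 ≤ i < len row_args), so the `.getD ""` default is never taken.
def gdKey (row_args : List String) (i : Int) : String :=
  PySem.Str.strip ((PySem.List.pyGet? row_args i).getD "")

-- A's inner `for j in range(len(found_vals)): if found_vals[j] == cur_arg: ref = found_cols[j]; break`
-- over the parallel lists; returns ref unchanged when no entry matches (A never reaches that case).
def gdInnerScan : List String → List Int → String → Int → Int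
  | v :: vs, c :: cs, cur, ref => if v == cur then c else gdInnerScan vs cs cur ref
  | _, _, _, ref => ref

-- one iteration of A's main loop; state = (cols, found_vals, found_cols, ref)
def gdStep (row_args : List String) (first : String)
    (st : List Int × List String × List Int × Int) (i : Int) :
    List Int × List String × List Int × Int :=
  let cur := gdKey row_args i
  let st' :=
    if cur ≠ first then
      if st.2.1.contains cur then
        (st.2.1, st.2.2.1, gdInnerScan st.2.1 st.2.2.1 cur st.2.2.2)
      else
        (st.2.1 ++ [cur], st.2.2.1 ++ [i], i)
    else (st.2.1, st.2.2.1, (0 : Int))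
  let ref := if st'.2.2 ≥ 0 then st'.2.2 else i
  (st.1 ++ [ref], st'.1, st'.2.1, ref)

def group_diffs (row_args : List String) : List Int :=
  match PySem.List.pyGet? row_args 1 with
  | none => []  -- Python raises IndexError here; excluded by Pre_group_diffs
  | some s1 =>
    let first := PySem.Str.strip s1
    ((PySem.List.pyRange 2 (PySem.List.len row_args) 1).foldl
      (gdStep row_args first) ([0, 0], [first], [0], -1)).1

-- ===== PORT B =====
-- one iteration of B's run-scan over the sorted (value, column) pairs;
-- state = (tagged, run_key, run_rep)
def gdAltStep (first : String)
    (st : List (Int × Int) × Option String × Int) (p : String × Int) :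
    List (Int × Int) × Option String × Int :=
  let (tagged, runKey, runRep) := st
  let (runKey, runRep) :=
    if some p.1 ≠ runKey then
      (some p.1, if p.1 = first then (0 : Int) else p.2 + 2)
    else (runKey, runRep)
  (tagged ++ [(p.2, runRep)], runKey, runRep)

def group_diffs_alt (row_args : List String) : List Int :=
  match PySem.List.pyGet? row_args 1 with
  | none => []  -- Python raises IndexError here; excluded by Pre_group_diffs
  | some s1 =>
    let first := PySem.Str.strip s1
    let keys := (PySem.List.slice row_args (some 2) none).map PySem.Str.strip
    let pairs := (PySem.List.enumerate keys 0).map (fun p => (p.2, p.1))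
    let tagged :=
      ((PySem.List.sorted2 pairs (fun p => p.1) (fun p => p.2) false).foldl
        (gdAltStep first) ([], none, 0)).1
    [0, 0] ++ (PySem.List.sorted2 tagged (fun p => p.1) (fun p => p.2) false).map (fun p => p.2)

-- ===== PRECONDITION & SPEC =====
-- Both Pythons raise IndexError on row_args[1] when the list has fewer than two elements.
def Pre_group_diffs (row_args : List String) : Prop := 2 ≤ row_args.length
instance (row_args : List String) : Decidable (Pre_group_diffs row_args) := by
  unfold Pre_group_diffs; infer_instance

def pvWitness_group_diffs : List String := ["h", "b", "c", "b ", "d"]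

def Spec_group_diffs (row_args : List String) (out : List Int) : Prop := out = group_diffs_alt row_args
instance (row_args : List String) (out : List Int) : Decidable (Spec_group_diffs row_args out) := by
  unfold Spec_group_diffs; infer_instance

-- ===== CLAIM (what is proved, stated in full; the proofs are below) =====
def Claim_equal_group_diffs : Prop := ∀ (row_args : List String), Dom_group_diffs row_args → Pre_group_diffs row_args → Spec_group_diffs row_args (group_diffs row_args)

-- ===== LEMMAS AND PROOFS =====

-- the value both programs assign to a column holding key k:
-- 0 for the reference value, else 2 + (first column of k among columns 2..)
def gdRep (keys : List String) (first : String) (k : String) : Int :=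
  if k = first then 0 else 2 + (List.idxOf k keys : Int)

-- ---------- A-side ----------

-- A's found_vals minus its head `first`, as a function of the processed prefix
def gdD (first : String) (pre : List String) : List String :=
  PySem.List.dedup (pre.filter (fun k => !(k == first)))

lemma gdInnerScan_map (f : String → Int) (l : List String) (cur : String) (ref : Int)
    (h : cur ∈ l) : gdInnerScan l (l.map f) cur ref = f cur := by
  induction l with
  | nil => simp at h
  | cons v vs ih =>
    by_cases hv : v = cur
    · simp [gdInnerScan, hv]
    · have hcur : cur ∈ vs := by
        rcases List.mem_cons.mp h with h' | h'
        · exact absurd h'.symm hv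
        · exact h'
      simp [gdInnerScan, hv, ih hcur]

lemma dedup_append_singleton (l : List String) (c : String) :
    PySem.List.dedup (l ++ [c]) =
      if c ∈ l then PySem.List.dedup l else PySem.List.dedup l ++ [c] := by
  rw [PySem.List.dedup_eq_ofList, PySem.List.dedup_eq_ofList]
  have : PySem.Set.ofList (l ++ [c]) = PySem.Set.add (PySem.Set.ofList l) c := by
    simp [PySem.Set.ofList, List.foldl_append]
  rw [this]
  unfold PySem.Set.add
  by_cases hc : c ∈ l
  · simp [hc]
  · simp [hc]

lemma mem_gdD (first : String) (pre : List String) (k : String) :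
    k ∈ gdD first pre ↔ k ∈ pre ∧ k ≠ first := by
  unfold gdD
  rw [PySem.List.mem_dedup, List.mem_filter]
  simp

lemma gdD_append (first : String) (pre : List String) (k : String) :
    gdD first (pre ++ [k]) =
      if k = first ∨ k ∈ pre then gdD first pre else gdD first pre ++ [k] := by
  unfold gdD
  by_cases hf : k = first
  · simp [List.filter_append, hf]
  · rw [List.filter_append]
    have : (([k] : List String).filter (fun x => !(x == first))) = [k] := by simp [hf]
    rw [this, dedup_append_singleton]
    by_cases hm : k ∈ pre
    · have : k ∈ pre.filter (fun x => !(x == first)) := by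
        rw [List.mem_filter]; simp [hm, hf]
      simp [this, hf, hm]
    · have : k ∉ pre.filter (fun x => !(x == first)) := by
        intro h; exact hm (List.mem_of_mem_filter h)
      simp [this, hf, hm]

-- strip(row_args[i]) at loop position i = 2 + |pre| is the head of the remaining keys
lemma gdKey_at (row_args : List String) (pre suf : List String) (k : String)
    (hkeys : (row_args.drop 2).map PySem.Str.strip = pre ++ k :: suf) :
    gdKey row_args (2 + (pre.length : Int)) = k := by
  have hlen := congrArg List.length hkeys
  simp at hlen
  have h2p : 2 + pre.length < row_args.length := by omega
  unfold gdKey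
  rw [show (2 + (pre.length : Int)) = ((2 + pre.length : Nat) : Int) by push_cast; ring,
      PySem.List.pyGet?_natCast, List.getElem?_eq_getElem h2p]
  have h := congrArg (fun l => l[pre.length]?) hkeys
  simp only [List.getElem?_map, List.getElem?_drop, List.getElem?_append_right (Nat.le_refl _),
    Nat.sub_self, List.getElem?_cons_zero] at h
  rw [List.getElem?_eq_getElem h2p] at h
  simpa using h

-- A's main loop, from any processed prefix: it emits gdRep of every remaining key
lemma gdA_loop (row_args : List String) (first : String) (keys : List String)
    (hkeys0 : keys = (row_args.drop 2).map PySem.Str.strip) (suf : List String) :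
    ∀ (pre : List String) (cols : List Int) (ref : Int),
    keys = pre ++ suf →
    ((PySem.List.pyRange (2 + (pre.length : Int)) (2 + (keys.length : Int)) 1).foldl
        (gdStep row_args first)
        (cols, first :: gdD first pre,
         0 :: (gdD first pre).map (fun v => 2 + (List.idxOf v keys : Int)), ref)).1
      = cols ++ suf.map (gdRep keys first) := by
  induction suf with
  | nil =>
    intro pre cols ref hpre
    rw [PySem.List.pyRange_one_eq_nil (by
      have := congrArg List.length hpre
      simp at this
      omega)]
    simp
  | cons k suf' ih =>
    intro pre cols ref hpre
    have hlen := congrArg List.length hpre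
    simp at hlen
    have hcur : gdKey row_args (2 + (pre.length : Int)) = k :=
      gdKey_at row_args pre suf' k (by rw [← hkeys0, hpre])
    have hrange : PySem.List.pyRange (2 + (pre.length : Int)) (2 + (keys.length : Int)) 1
        = (2 + (pre.length : Int)) ::
          PySem.List.pyRange (2 + (((pre ++ [k]).length : Nat) : Int)) (2 + (keys.length : Int)) 1 := by
      have harg : 2 + (pre.length : Int) + 1 = 2 + (((pre ++ [k]).length : Nat) : Int) := by
        simp only [List.length_append, List.length_cons, List.length_nil]
        push_cast
        ring
      rw [PySem.List.pyRange_one_cons (by omega), harg]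
    rw [hrange, List.foldl_cons]
    have hpre' : keys = (pre ++ [k]) ++ suf' := by rw [hpre]; simp
    by_cases hf : k = first
    · -- cur == first: emit 0, state unchanged
      have hstep : gdStep row_args first
          (cols, first :: gdD first pre,
            0 :: (gdD first pre).map (fun v => 2 + (List.idxOf v keys : Int)), ref)
          (2 + (pre.length : Int))
          = (cols ++ [(0 : Int)], first :: gdD first pre,
             0 :: (gdD first pre).map (fun v => 2 + (List.idxOf v keys : Int)), 0) := by
        simp [gdStep, hcur, hf]
      rw [hstep]
      have hD : gdD first (pre ++ [k]) = gdD first pre := by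
        rw [gdD_append]
        simp [hf]
      have := ih (pre ++ [k]) (cols ++ [(0 : Int)]) 0 hpre'
      rw [hD] at this
      rw [this]
      simp [gdRep, hf]
    · by_cases hm : k ∈ pre
      · -- seen before: the inner scan returns the recorded first column
        have hmem : k ∈ gdD first pre := (mem_gdD first pre k).mpr ⟨hm, hf⟩
        have hcont : (first :: gdD first pre).contains k = true := by
          simp [hmem]
        have hscan : gdInnerScan (first :: gdD first pre)
            (0 :: (gdD first pre).map (fun v => 2 + (List.idxOf v keys : Int))) k ref
            = 2 + (List.idxOf k keys : Int) := by
          have hne : (first == k) = false := by simp [Ne.symm hf]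
          simp only [gdInnerScan, hne, Bool.false_eq_true, if_false]
          exact gdInnerScan_map (fun v => 2 + (List.idxOf v keys : Int)) _ k ref hmem
        have hstep : gdStep row_args first
            (cols, first :: gdD first pre,
              0 :: (gdD first pre).map (fun v => 2 + (List.idxOf v keys : Int)), ref)
            (2 + (pre.length : Int))
            = (cols ++ [2 + (List.idxOf k keys : Int)], first :: gdD first pre,
               0 :: (gdD first pre).map (fun v => 2 + (List.idxOf v keys : Int)),
               2 + (List.idxOf k keys : Int)) := by
          simp only [gdStep, hcur]
          rw [if_pos hf, if_pos hcont]
          simp only [hscan]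
          rw [if_pos (by positivity)]
        rw [hstep]
        have hD : gdD first (pre ++ [k]) = gdD first pre := by
          rw [gdD_append]
          simp [hm]
        have := ih (pre ++ [k]) (cols ++ [2 + (List.idxOf k keys : Int)])
          (2 + (List.idxOf k keys : Int)) hpre'
        rw [hD] at this
        rw [this]
        simp [gdRep, hf]
      · -- new key: recorded with column i = 2 + |pre|, its first occurrence
        have hnmem : k ∉ gdD first pre := fun h => hm ((mem_gdD first pre k).mp h).1
        have hcont : ¬ ((first :: gdD first pre).contains k = true) := by
          intro hc
          have hmemk : k ∈ first :: gdD first pre := by simpa using hc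
          rcases List.mem_cons.mp hmemk with hmk | hmk
          · exact hf hmk
          · exact hnmem hmk
        have hidx : List.idxOf k keys = pre.length := by
          rw [hpre, List.idxOf_append]
          simp [hm]
        have hstep : gdStep row_args first
            (cols, first :: gdD first pre,
              0 :: (gdD first pre).map (fun v => 2 + (List.idxOf v keys : Int)), ref)
            (2 + (pre.length : Int))
            = (cols ++ [2 + (pre.length : Int)], (first :: gdD first pre) ++ [k],
               (0 :: (gdD first pre).map (fun v => 2 + (List.idxOf v keys : Int)))
                 ++ [2 + (pre.length : Int)], 2 + (pre.length : Int)) := by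
          simp only [gdStep, hcur]
          rw [if_pos hf, if_neg hcont]
          rw [if_pos (by positivity)]
        rw [hstep]
        have hD : gdD first (pre ++ [k]) = gdD first pre ++ [k] := by
          rw [gdD_append]
          simp [hm, hf]
        have hfl : ((0 :: (gdD first pre).map (fun v => 2 + (List.idxOf v keys : Int)))
              ++ [2 + (pre.length : Int)])
            = 0 :: (gdD first (pre ++ [k])).map (fun v => 2 + (List.idxOf v keys : Int)) := by
          rw [hD]
          simp [hidx]
        have hst : ((first :: gdD first pre) ++ [k]) = first :: gdD first (pre ++ [k]) := by
          rw [hD]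
          simp
        rw [hst, hfl]
        have := ih (pre ++ [k]) (cols ++ [2 + (pre.length : Int)]) (2 + (pre.length : Int)) hpre'
        rw [this]
        simp [gdRep, hf, hidx]

-- ---------- B-side ----------

-- strict and non-strict lexicographic order on pairs (what Python's tuple `<` is)
def lexLT {κ₁ κ₂ : Type} [LT κ₁] [LT κ₂] (a b : κ₁ × κ₂) : Prop :=
  a.1 < b.1 ∨ (a.1 = b.1 ∧ a.2 < b.2)

def lexLE {κ₁ κ₂ : Type} [LT κ₁] [LE κ₂] (a b : κ₁ × κ₂) : Prop :=
  a.1 < b.1 ∨ (a.1 = b.1 ∧ a.2 ≤ b.2)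

def gdBefore {κ₁ κ₂ : Type} [LT κ₁] [DecidableLT κ₁] [LT κ₂] [DecidableLT κ₂]
    (a b : κ₁ × κ₂) : Bool :=
  decide (a.1 < b.1) || (!decide (b.1 < a.1) && decide (a.2 < b.2))

lemma sorted2_eq_foldl {κ₁ κ₂ : Type} [LT κ₁] [DecidableLT κ₁] [LT κ₂] [DecidableLT κ₂]
    (xs : List (κ₁ × κ₂)) :
    PySem.List.sorted2 xs (fun p => p.1) (fun p => p.2) false
      = xs.foldl (fun acc x => PySem.List.insertBy gdBefore x acc) [] := rfl

lemma gdBefore_true_le {κ₁ κ₂ : Type} [LinearOrder κ₁] [LinearOrder κ₂]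
    {a b : κ₁ × κ₂} (h : gdBefore a b = true) : lexLE a b := by
  unfold gdBefore at h
  unfold lexLE
  rcases Bool.or_eq_true_iff.mp h with h | h
  · exact Or.inl (by simpa using h)
  · rcases Bool.and_eq_true_iff.mp h with ⟨h1, h2⟩
    have h1 : ¬ (b.1 < a.1) := by simpa using h1
    have h2 : a.2 < b.2 := by simpa using h2
    rcases lt_or_ge a.1 b.1 with hlt | hge
    · exact Or.inl hlt
    · exact Or.inr ⟨le_antisymm (le_of_not_gt h1) hge, le_of_lt h2⟩

lemma gdBefore_false_le {κ₁ κ₂ : Type} [LinearOrder κ₁] [LinearOrder κ₂]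
    {a b : κ₁ × κ₂} (h : gdBefore a b = false) : lexLE b a := by
  unfold gdBefore at h
  unfold lexLE
  rcases Bool.or_eq_false_iff.mp h with ⟨h1, h2⟩
  have h1 : ¬ (a.1 < b.1) := by simpa using h1
  rcases Bool.and_eq_false_iff.mp h2 with h3 | h3
  · have : b.1 < a.1 := by simpa using h3
    exact Or.inl this
  · have h3 : ¬ (a.2 < b.2) := by simpa using h3
    rcases lt_or_ge b.1 a.1 with hlt | hge
    · exact Or.inl hlt
    · exact Or.inr ⟨le_antisymm (not_lt.mp h1) hge, not_lt.mp h3⟩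

lemma lexLE_trans {κ₁ κ₂ : Type} [LinearOrder κ₁] [LinearOrder κ₂]
    {a b c : κ₁ × κ₂} (h1 : lexLE a b) (h2 : lexLE b c) : lexLE a c := by
  unfold lexLE at *
  rcases h1 with h1 | ⟨h1, h1'⟩ <;> rcases h2 with h2 | ⟨h2, h2'⟩
  · exact Or.inl (lt_trans h1 h2)
  · exact Or.inl (h2 ▸ h1)
  · exact Or.inl (h1 ▸ h2)
  · exact Or.inr ⟨h1.trans h2, le_trans h1' h2'⟩

lemma insertBy_perm {α : Type} (before : α → α → Bool) (x : α) (ys : List α) :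
    (PySem.List.insertBy before x ys).Perm (x :: ys) := by
  induction ys with
  | nil => simp [PySem.List.insertBy]
  | cons y ys ih =>
    cases hb : before x y with
    | true => simp [PySem.List.insertBy, hb]
    | false =>
      simp only [PySem.List.insertBy, hb, Bool.false_eq_true, if_false]
      exact (ih.cons y).trans (List.Perm.swap x y ys)

lemma insertBy_pairwise {κ₁ κ₂ : Type} [LinearOrder κ₁] [LinearOrder κ₂]
    (x : κ₁ × κ₂) (ys : List (κ₁ × κ₂)) (h : ys.Pairwise lexLE) :
    (PySem.List.insertBy gdBefore x ys).Pairwise lexLE := by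
  induction ys with
  | nil => simp [PySem.List.insertBy, lexLE]
  | cons y ys ih =>
    rcases List.pairwise_cons.mp h with ⟨hy, hys⟩
    by_cases hb : gdBefore x y = true
    · simp only [PySem.List.insertBy, hb, if_true]
      refine List.pairwise_cons.mpr ⟨?_, h⟩
      intro z hz
      rcases List.mem_cons.mp hz with rfl | hz
      · exact gdBefore_true_le hb
      · exact lexLE_trans (gdBefore_true_le hb) (hy z hz)
    · have hb' : gdBefore x y = false := by simpa using hb
      simp only [PySem.List.insertBy, hb', Bool.false_eq_true, if_false]
      refine List.pairwise_cons.mpr ⟨?_, ih hys⟩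
      intro z hz
      rcases (PySem.List.mem_insertBy gdBefore x z ys).mp hz with rfl | hz
      · exact gdBefore_false_le hb'
      · exact hy z hz

lemma foldl_insertBy_sorted {κ₁ κ₂ : Type} [LinearOrder κ₁] [LinearOrder κ₂]
    (xs : List (κ₁ × κ₂)) : ∀ (acc : List (κ₁ × κ₂)), acc.Pairwise lexLE →
    (xs.foldl (fun acc x => PySem.List.insertBy gdBefore x acc) acc).Pairwise lexLE ∧
    (xs.foldl (fun acc x => PySem.List.insertBy gdBefore x acc) acc).Perm (acc ++ xs) := by
  induction xs with
  | nil => intro acc h; simpa using h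
  | cons x xs ih =>
    intro acc h
    simp only [List.foldl_cons]
    rcases ih (PySem.List.insertBy gdBefore x acc) (insertBy_pairwise x acc h) with ⟨hp, hperm⟩
    refine ⟨hp, hperm.trans ?_⟩
    exact ((insertBy_perm gdBefore x acc).append_right xs).trans List.perm_middle.symm

lemma lexLE_antisymm {κ₁ κ₂ : Type} [LinearOrder κ₁] [LinearOrder κ₂]
    {a b : κ₁ × κ₂} (h1 : lexLE a b) (h2 : lexLE b a) : a = b := by
  unfold lexLE at *
  rcases h1 with h1 | ⟨h1, h1'⟩ <;> rcases h2 with h2 | ⟨h2, h2'⟩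
  · exact absurd h2 (lt_asymm h1)
  · exact absurd h1 (h2 ▸ lt_irrefl _)
  · exact absurd h2 (h1 ▸ lt_irrefl _)
  · exact Prod.ext h1 (le_antisymm h1' h2')

-- sorted() of distinct tuples: name the result — any strictly lex-increasing
-- rearrangement of xs IS sorted2 xs fst snd
lemma sorted2_eq_of_pairwise {κ₁ κ₂ : Type} [LinearOrder κ₁] [LinearOrder κ₂]
    (xs ys : List (κ₁ × κ₂)) (hperm : ys.Perm xs) (hpw : ys.Pairwise lexLT) :
    PySem.List.sorted2 xs (fun p => p.1) (fun p => p.2) false = ys := by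
  rw [sorted2_eq_foldl]
  rcases foldl_insertBy_sorted xs [] (by simp) with ⟨hp, hperm'⟩
  have hys : ys.Pairwise lexLE := hpw.imp (by
    intro a b h
    unfold lexLT lexLE at *
    rcases h with h | ⟨h, h'⟩
    · exact Or.inl h
    · exact Or.inr ⟨h, le_of_lt h'⟩)
  exact List.Perm.eq_of_pairwise (fun a b _ _ h1 h2 => lexLE_antisymm h1 h2)
    hp hys (hperm'.trans hperm.symm)

-- the (ascending) columns 0-based at which key k occurs in keys, offset s
def gdPos (keys : List String) (k : String) (s : Int) : List Int :=
  match keys with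
  | [] => []
  | x :: xs => if x = k then s :: gdPos xs k (s + 1) else gdPos xs k (s + 1)

lemma mem_gdPos (keys : List String) (k : String) : ∀ (s t : Int),
    t ∈ gdPos keys k s ↔ ∃ (j : Nat) (_ : j < keys.length), keys[j] = k ∧ t = s + j := by
  induction keys with
  | nil => intro s t; simp [gdPos]
  | cons x xs ih =>
    intro s t
    by_cases hx : x = k
    · simp only [gdPos, hx, if_true, List.mem_cons, ih (s + 1) t]
      constructor
      · rintro (rfl | ⟨j, hj, hk, rfl⟩)
        · exact ⟨0, by simp, by simp, by simp⟩
        · exact ⟨j + 1, by simpa using hj, by simpa using hk, by push_cast; ring⟩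
      · rintro ⟨j, hj, hk, rfl⟩
        cases j with
        | zero => exact Or.inl (by simp)
        | succ j => exact Or.inr ⟨j, by simpa using hj, by simpa using hk, by push_cast; ring⟩
    · simp only [gdPos, hx, if_false, ih (s + 1) t]
      constructor
      · rintro ⟨j, hj, hk, rfl⟩
        exact ⟨j + 1, by simpa using hj, by simpa using hk, by push_cast; ring⟩
      · rintro ⟨j, hj, hk, rfl⟩
        cases j with
        | zero => exact absurd (by simpa using hk) hx
        | succ j => exact ⟨j, by simpa using hj, by simpa using hk, by push_cast; ring⟩

lemma gdPos_ge (keys : List String) (k : String) : ∀ (s t : Int), t ∈ gdPos keys k s → s ≤ t := by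
  intro s t h
  rcases (mem_gdPos keys k s t).mp h with ⟨j, _, _, rfl⟩
  omega

lemma pairwise_gdPos (keys : List String) (k : String) : ∀ (s : Int),
    (gdPos keys k s).Pairwise (· < ·) := by
  induction keys with
  | nil => intro s; simp [gdPos]
  | cons x xs ih =>
    intro s
    by_cases hx : x = k
    · simp only [gdPos, hx, if_true]
      refine List.pairwise_cons.mpr ⟨?_, ih (s + 1)⟩
      intro t ht
      have := gdPos_ge xs k (s + 1) t ht
      omega
    · simp only [gdPos, hx, if_false]; exact ih (s + 1)

lemma gdPos_head (keys : List String) (k : String) (hmem : k ∈ keys) : ∀ (s : Int),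
    ∃ rest, gdPos keys k s = (s + (List.idxOf k keys : Int)) :: rest := by
  induction keys with
  | nil => simp at hmem
  | cons x xs ih =>
    intro s
    by_cases hx : x = k
    · refine ⟨gdPos xs k (s + 1), ?_⟩
      simp [gdPos, hx]
    · have hmem' : k ∈ xs := by
        rcases List.mem_cons.mp hmem with h | h
        · exact absurd h.symm hx
        · exact h
      rcases ih hmem' (s + 1) with ⟨rest, hrest⟩
      refine ⟨rest, ?_⟩
      have hbeq : (x == k) = false := by simpa using hx
      simp only [gdPos, hx, if_false, hrest, List.idxOf_cons, hbeq, cond_false]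
      congr 1
      push_cast
      ring

-- the fully sorted (value, column) list, named: groups of equal values in
-- ascending value order, each group's columns ascending
def gdSorted (keys : List String) : List (String × Int) :=
  (PySem.List.sorted (PySem.List.dedup keys) (fun s => s) false).flatMap
    (fun k => (gdPos keys k 0).map (fun t => (k, t)))

lemma mem_gdSorted (keys : List String) (p : String × Int) :
    p ∈ gdSorted keys ↔ ∃ (j : Nat) (_ : j < keys.length), p = (keys[j], (j : Int)) := by
  unfold gdSorted
  rw [List.mem_flatMap]
  constructor
  · rintro ⟨k, hk, hp⟩
    rcases List.mem_map.mp hp with ⟨t, ht, rfl⟩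
    rcases (mem_gdPos keys k 0 t).mp ht with ⟨j, hj, hkj, rfl⟩
    exact ⟨j, hj, by simp [hkj]⟩
  · rintro ⟨j, hj, rfl⟩
    refine ⟨keys[j], ?_, ?_⟩
    · rw [PySem.List.mem_sorted, PySem.List.mem_dedup]
      exact List.getElem_mem hj
    · exact List.mem_map.mpr ⟨(j : Int), (mem_gdPos keys keys[j] 0 (j : Int)).mpr
        ⟨j, hj, rfl, by simp⟩, rfl⟩

lemma pairwise_flatMap_lexLT (keys : List String) : ∀ (G : List String),
    G.Pairwise (· < ·) →
    (G.flatMap (fun k => (gdPos keys k 0).map (fun t => (k, t)))).Pairwise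
      (lexLT (κ₁ := String) (κ₂ := Int)) := by
  intro G
  induction G with
  | nil => intro _; simp
  | cons d ds ih =>
    intro h
    rcases List.pairwise_cons.mp h with ⟨hd, hds⟩
    rw [List.flatMap_cons, List.pairwise_append]
    refine ⟨?_, ih hds, ?_⟩
    · rw [List.pairwise_map]
      exact (pairwise_gdPos keys d 0).imp (fun h => Or.inr ⟨rfl, h⟩)
    · intro a ha b hb
      rcases List.mem_map.mp ha with ⟨t, _, rfl⟩
      rcases List.mem_flatMap.mp hb with ⟨k', hk', hbk⟩
      rcases List.mem_map.mp hbk with ⟨t', _, rfl⟩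
      exact Or.inl (hd k' hk')

lemma nodup_of_pairwise_lexLT {κ₁ κ₂ : Type} [LinearOrder κ₁] [LinearOrder κ₂]
    {l : List (κ₁ × κ₂)} (h : l.Pairwise lexLT) : l.Nodup :=
  h.imp (by
    rintro a b (h | ⟨h, h'⟩) rfl
    · exact lt_irrefl _ h
    · exact lt_irrefl _ h')

-- the first sorted() of B, named
lemma gdSorted_name (keys : List String) :
    PySem.List.sorted2 ((PySem.List.enumerate keys 0).map (fun p => (p.2, p.1)))
      (fun p => p.1) (fun p => p.2) false = gdSorted keys := by
  have hpw : (gdSorted keys).Pairwise (lexLT (κ₁ := String) (κ₂ := Int)) := by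
    apply pairwise_flatMap_lexLT
    rw [PySem.List.dedup_eq_ofList]
    exact PySem.List.sorted_ofList_pairwise_lt keys
  apply sorted2_eq_of_pairwise
  · rw [List.perm_ext_iff_of_nodup (nodup_of_pairwise_lexLT hpw)]
    · intro p
      rw [mem_gdSorted]
      constructor
      · rintro ⟨j, hj, rfl⟩
        exact List.mem_map.mpr ⟨((j : Int), keys[j]),
          (PySem.List.mem_enumerate_iff keys 0 _).mpr ⟨j, hj, by simp⟩, rfl⟩
      · intro hp
        rcases List.mem_map.mp hp with ⟨q, hq, rfl⟩
        rcases (PySem.List.mem_enumerate_iff keys 0 q).mp hq with ⟨j, hj, rfl⟩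
        exact ⟨j, hj, by simp⟩
    · have hp2 : ((PySem.List.enumerate keys 0).map (fun p => (p.2, p.1))).Pairwise
          (fun a b : String × Int => a.2 < b.2) := by
        rw [List.pairwise_map]
        exact (PySem.List.pairwise_lt_enumerate keys 0).imp (fun h => h)
      exact hp2.imp (by rintro a b h rfl; exact lt_irrefl _ h)
  · exact hpw

-- B's scan through one run of equal values keeps the run's reference
lemma gdScan_run (first k : String) (r : Int) : ∀ (ts : List Int) (acc : List (Int × Int)),
    ((ts.map (fun t => (k, t))).foldl (gdAltStep first) (acc, some k, r))
      = (acc ++ ts.map (fun t => (t, r)), some k, r) := by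
  intro ts
  induction ts with
  | nil => intro acc; simp
  | cons t ts ih =>
    intro acc
    simp only [List.map_cons, List.foldl_cons]
    have hstep : gdAltStep first (acc, some k, r) (k, t) = (acc ++ [(t, r)], some k, r) := by
      simp [gdAltStep]
    rw [hstep, ih]
    simp

-- B's scan over the grouped sorted list tags every column with its group's reference
lemma gdScan_groups (keys : List String) (first : String) : ∀ (G : List String)
    (acc : List (Int × Int)) (runKey : Option String) (runRep : Int),
    (∀ k ∈ G, runKey ≠ some k) → G.Pairwise (· < ·) → (∀ k ∈ G, k ∈ keys) →
    ((G.flatMap (fun k => (gdPos keys k 0).map (fun t => (k, t)))).foldl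
        (gdAltStep first) (acc, runKey, runRep)).1
      = acc ++ G.flatMap (fun k => (gdPos keys k 0).map (fun t => (t, gdRep keys first k))) := by
  intro G
  induction G with
  | nil => intro acc runKey runRep _ _ _; simp
  | cons d ds ih =>
    intro acc runKey runRep hrk hpw hmem
    rcases List.pairwise_cons.mp hpw with ⟨hd, hds⟩
    have hdk : d ∈ keys := hmem d (by simp)
    rcases gdPos_head keys d hdk 0 with ⟨rest, hhead⟩
    rw [List.flatMap_cons, List.foldl_append]
    -- first element of the run resets the reference to gdRep
    have hne : some d ≠ runKey := fun h => hrk d (by simp) h.symm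
    have hrep : (if d = first then (0 : Int) else (0 + (List.idxOf d keys : Int)) + 2)
        = gdRep keys first d := by
      unfold gdRep
      by_cases hdf : d = first
      · simp [hdf]
      · simp [hdf]
        ring
    have hstep : gdAltStep first (acc, runKey, runRep) (d, 0 + (List.idxOf d keys : Int))
        = (acc ++ [(0 + (List.idxOf d keys : Int), gdRep keys first d)], some d, gdRep keys first d) := by
      simp only [gdAltStep, ne_eq, hne, not_false_iff, if_true, ← hrep]
    rw [hhead]
    simp only [List.map_cons, List.foldl_cons]
    rw [hstep, gdScan_run first d (gdRep keys first d) rest]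
    rw [ih _ (some d) (gdRep keys first d)
      (fun k hk h => absurd (Option.some.inj h) (ne_of_lt (hd k hk)))
      hds (fun k hk => hmem k (by simp [hk]))]
    simp [hhead]

-- ---------- assembling both sides ----------

lemma groupA_eq (row_args : List String) (h2 : 2 ≤ row_args.length) :
    group_diffs row_args
      = [0, 0] ++ ((row_args.drop 2).map PySem.Str.strip).map
          (gdRep ((row_args.drop 2).map PySem.Str.strip)
            (PySem.Str.strip ((PySem.List.pyGet? row_args 1).getD ""))) := by
  have h1 : (1 : Nat) < row_args.length := by omega
  have hg : PySem.List.pyGet? row_args 1 = some row_args[1] := by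
    have := PySem.List.pyGet?_natCast row_args 1
    rw [show ((1 : Nat) : Int) = (1 : Int) by norm_num] at this
    rw [this, List.getElem?_eq_getElem h1]
  set keys := (row_args.drop 2).map PySem.Str.strip with hk
  set first := PySem.Str.strip row_args[1] with hf
  have hlen : (PySem.List.len row_args) = 2 + ((keys.length : Nat) : Int) := by
    have : keys.length = row_args.length - 2 := by simp [hk]
    rw [PySem.List.len_eq, this]
    omega
  have main := gdA_loop row_args first keys hk keys [] [0, 0] (-1) (by simp)
  rw [show gdD first [] = [] from rfl] at main
  simp only [List.length_nil, Nat.cast_zero, add_zero, List.map_nil] at main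
  unfold group_diffs
  rw [hg, hlen]
  simpa using main

lemma groupB_eq (row_args : List String) (h2 : 2 ≤ row_args.length) :
    group_diffs_alt row_args
      = [0, 0] ++ ((row_args.drop 2).map PySem.Str.strip).map
          (gdRep ((row_args.drop 2).map PySem.Str.strip)
            (PySem.Str.strip ((PySem.List.pyGet? row_args 1).getD ""))) := by
  have h1 : (1 : Nat) < row_args.length := by omega
  have hg : PySem.List.pyGet? row_args 1 = some row_args[1] := by
    have := PySem.List.pyGet?_natCast row_args 1
    rw [show ((1 : Nat) : Int) = (1 : Int) by norm_num] at this
    rw [this, List.getElem?_eq_getElem h1]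
  unfold group_diffs_alt
  rw [hg]
  simp only
  rw [PySem.List.slice_from row_args (by norm_num : (0 : Int) ≤ 2),
    show ((2 : Int)).toNat = 2 from rfl]
  set keys := ((row_args.drop 2).map PySem.Str.strip) with hk
  set first := PySem.Str.strip row_args[1] with hf
  -- first sort
  rw [gdSorted_name keys]
  -- run scan
  have hGpw : (PySem.List.sorted (PySem.List.dedup keys) (fun s => s) false).Pairwise (· < ·) := by
    rw [PySem.List.dedup_eq_ofList]
    exact PySem.List.sorted_ofList_pairwise_lt keys
  have htag : ((gdSorted keys).foldl (gdAltStep first) ([], none, 0)).1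
      = (PySem.List.sorted (PySem.List.dedup keys) (fun s => s) false).flatMap
          (fun k => (gdPos keys k 0).map (fun t => (t, gdRep keys first k))) := by
    unfold gdSorted
    rw [gdScan_groups keys first _ [] none 0 (fun k _ h => by simp at h) hGpw
      (fun k hk => by
        rw [PySem.List.mem_sorted, PySem.List.mem_dedup] at hk; exact hk)]
    simp
  rw [htag]
  -- flatMap of tagged = map over gdSorted
  have hmapform : (PySem.List.sorted (PySem.List.dedup keys) (fun s => s) false).flatMap
        (fun k => (gdPos keys k 0).map (fun t => (t, gdRep keys first k)))
      = (gdSorted keys).map (fun p => (p.2, gdRep keys first p.1)) := by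
    unfold gdSorted
    rw [List.map_flatMap]
    congr 1
    funext k
    rw [List.map_map]
    rfl
  rw [hmapform]
  -- second sort, named
  have hperm : ((PySem.List.enumerate keys 0).map (fun q => (q.1, gdRep keys first q.2))).Perm
      ((gdSorted keys).map (fun p => (p.2, gdRep keys first p.1))) := by
    have hS : (gdSorted keys).Perm ((PySem.List.enumerate keys 0).map (fun p => (p.2, p.1))) := by
      rw [← gdSorted_name keys]
      exact PySem.List.sorted2_perm _ _ _ _
    have := hS.map (fun p : String × Int => (p.2, gdRep keys first p.1))
    rw [List.map_map] at this
    exact this.symm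
  have hpw2 : ((PySem.List.enumerate keys 0).map (fun q => (q.1, gdRep keys first q.2))).Pairwise
      (lexLT (κ₁ := Int) (κ₂ := Int)) := by
    rw [List.pairwise_map]
    exact (PySem.List.pairwise_lt_enumerate keys 0).imp (fun h => Or.inl h)
  rw [sorted2_eq_of_pairwise _ _ hperm hpw2]
  rw [List.map_map]
  have : ((PySem.List.enumerate keys 0).map
      ((fun p : Int × Int => p.2) ∘ (fun q : Int × String => (q.1, gdRep keys first q.2))))
      = ((PySem.List.enumerate keys 0).map (fun q => q.2)).map (gdRep keys first) := by
    rw [List.map_map]; rfl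
  rw [this, PySem.List.map_snd_enumerate]
  simp [hf]

-- ===== VERDICT (by name: the statement is the Claim_ definition above) =====
theorem group_diffs_spec : Claim_equal_group_diffs := by
  intro row_args _ hpre
  unfold Spec_group_diffs
  unfold Pre_group_diffs at hpre
  rw [groupA_eq row_args hpre, groupB_eq row_args hpre]
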